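-- pv_equiv track=rewrite | github.com/rianp/TIc-Tac-Toe | console.py | calc_board_width
-- ===== SOURCE A (Python) =====
-- def calc_board_width(string):
--     counting = False
--     count = 0
--
--     for char in string:
--         if char == "*":
--             if not counting:
--                 counting = True
--             else:
--                 break
--         elif counting:
--             count += 1
--
--     return count + 2
-- ===== SOURCE B (Python) =====
-- def calc_board_width(string):
--     parts = string.split("*")
--     return len(parts[1]) + 2 if len(parts) >= 2 else 2
-- ===== Notes on version B (the rewrite author's own statement) =====
-- stated objective: simpler
-- what changed: Replaces the stateful char-by-char scan with a counting flag and break by a single str.split on the asterisk delimiter followed by measuring the second segment's length.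
import Mathlib
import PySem

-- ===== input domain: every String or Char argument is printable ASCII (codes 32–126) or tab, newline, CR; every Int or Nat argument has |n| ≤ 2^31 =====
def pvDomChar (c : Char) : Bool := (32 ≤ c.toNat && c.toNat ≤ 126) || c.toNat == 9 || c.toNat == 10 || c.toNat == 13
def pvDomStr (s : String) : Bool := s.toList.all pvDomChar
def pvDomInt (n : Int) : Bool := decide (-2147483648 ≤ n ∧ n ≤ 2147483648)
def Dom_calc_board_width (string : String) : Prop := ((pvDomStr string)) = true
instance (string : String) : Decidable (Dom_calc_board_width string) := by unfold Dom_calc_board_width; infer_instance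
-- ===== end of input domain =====

-- B replaces A's stateful scan (counting flag + break) by split("*") and the length of the second segment; objective: simpler.


-- ===== PORT A =====
-- A's loop over the characters: state = (counting, count); the second '*' breaks.
def pvScanA : List Char → Bool → Int → Int
  | [], _, count => count + 2
  | c :: rest, counting, count =>
    if c = '*' then
      if counting = false then pvScanA rest true count
      else count + 2                                   -- break
    else if counting = true then pvScanA rest counting (count + 1)
    else pvScanA rest counting count

def calc_board_width (string : String) : Int := pvScanA string.toList false 0

-- ===== PORT B =====
def calc_board_width_alt (string : String) : Int :=
  let parts := PySem.Chars.splitOn string.toList ['*']   -- string.split("*")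
  if 2 ≤ parts.length then ((parts[1]?).getD []).length + 2 else 2

-- ===== PRECONDITION & SPEC =====
def Spec_calc_board_width (string : String) (out : Int) : Prop := out = calc_board_width_alt string
instance (string : String) (out : Int) : Decidable (Spec_calc_board_width string out) := by unfold Spec_calc_board_width; infer_instance

-- ===== CLAIM (what is proved, stated in full; the proofs are below) =====
def Claim_equal_calc_board_width : Prop := ∀ (string : String), Dom_calc_board_width string → Spec_calc_board_width string (calc_board_width string)

-- ===== LEMMAS AND PROOFS =====

-- a simple structural model of splitting on '*'
def mySplit : List Char → List (List Char)
  | [] => [[]]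
  | c :: rest =>
    if c = '*' then [] :: mySplit rest
    else (mySplit rest).modifyHead (c :: ·)

lemma go_cons (f : Nat) (c : Char) (rest cur : List Char) (acc : List (List Char)) :
    PySem.Chars.splitOn.go ['*'] (f+1) (c::rest) cur acc =
      (if c = '*' then PySem.Chars.splitOn.go ['*'] f rest [] (cur.reverse :: acc)
       else PySem.Chars.splitOn.go ['*'] f rest (c :: cur) acc) := by
  rw [PySem.Chars.splitOn.go]
  by_cases h : c = '*'
  · simp [h, List.isPrefixOf]
  · simp [List.isPrefixOf, Ne.symm h, h]

lemma go_nil (cur : List Char) (acc : List (List Char)) (f : Nat) :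
    PySem.Chars.splitOn.go ['*'] f [] cur acc = (cur.reverse :: acc).reverse := by
  cases f <;> (rw [PySem.Chars.splitOn.go]; simp)

lemma mySplit_ne_nil (l : List Char) : mySplit l ≠ [] := by
  cases l with
  | nil => simp [mySplit]
  | cons c rest =>
      by_cases h : c = '*'
      · simp [mySplit, h]
      · simp only [mySplit, if_neg h]
        cases h' : mySplit rest with
        | nil => exact absurd h' (mySplit_ne_nil rest)
        | cons a t => simp

lemma go_spec (fuel : Nat) : ∀ (l cur : List Char) (acc : List (List Char)),
    l.length ≤ fuel →
    PySem.Chars.splitOn.go ['*'] fuel l cur acc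
      = acc.reverse ++ (mySplit l).modifyHead (fun s => cur.reverse ++ s) := by
  induction fuel with
  | zero =>
      intro l cur acc h
      have : l = [] := by cases l <;> simp_all
      subst this
      rw [go_nil]
      simp [mySplit]
  | succ f ih =>
      intro l cur acc h
      cases l with
      | nil => rw [go_nil]; simp [mySplit]
      | cons c rest =>
          rw [go_cons]
          by_cases hc : c = '*'
          · subst hc
            rw [ih rest [] _ (by simpa using h)]
            simp only [mySplit, List.reverse_cons,
              List.append_assoc, List.nil_append, List.reverse_nil]
            cases h' : mySplit rest with
            | nil => exact absurd h' (mySplit_ne_nil rest)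
            | cons a t => simp
          · rw [ih rest (c :: cur) acc (by simpa using h)]
            simp only [mySplit, if_neg hc]
            cases h' : mySplit rest with
            | nil => exact absurd h' (mySplit_ne_nil rest)
            | cons a t => simp

lemma splitOn_eq_mySplit (l : List Char) :
    PySem.Chars.splitOn l ['*'] = mySplit l := by
  rw [PySem.Chars.splitOn, go_spec (l.length + 1) l [] [] (by omega)]
  cases h : mySplit l with
  | nil => exact absurd h (mySplit_ne_nil l)
  | cons a t => simp

lemma head?_mySplit (l : List Char) :
    (mySplit l).head? = some (l.takeWhile (· ≠ '*')) := by
  induction l with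
  | nil => simp [mySplit]
  | cons c rest ih =>
      by_cases h : c = '*'
      · simp [mySplit, h]
      · simp only [mySplit, if_neg h]
        cases h' : mySplit rest with
        | nil => exact absurd h' (mySplit_ne_nil rest)
        | cons a t =>
            rw [h'] at ih
            simp only [List.head?_cons, Option.some.injEq] at ih
            simp [h, ih]

lemma scan_true (l : List Char) (c : Int) :
    pvScanA l true c = c + ((l.takeWhile (· ≠ '*')).length : Int) + 2 := by
  induction l generalizing c with
  | nil => simp [pvScanA]
  | cons a rest ih =>
      by_cases h : a = '*'
      · simp [pvScanA, h]
      · simp [pvScanA, h, ih]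
        ring

lemma scan_eq (l : List Char) :
    pvScanA l false 0 =
      (if 2 ≤ (mySplit l).length then (((mySplit l)[1]?.getD []).length : Int) + 2 else 2) := by
  induction l with
  | nil => simp [pvScanA, mySplit]
  | cons c rest ih =>
      by_cases h : c = '*'
      · have hne : mySplit rest ≠ [] := mySplit_ne_nil rest
        have hlen : 1 ≤ (mySplit rest).length := by
          cases h' : mySplit rest with
          | nil => exact absurd h' hne
          | cons a t => simp
        have hstep : pvScanA (c :: rest) false 0 = pvScanA rest true 0 := by
          simp [pvScanA, h]
        have hget : (([] :: mySplit rest)[1]? ) = (mySplit rest).head? := by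
          cases h' : mySplit rest with
          | nil => exact absurd h' hne
          | cons a t => simp
        rw [hstep, scan_true]
        simp only [mySplit, if_pos h]
        rw [if_pos (by simpa using hlen), hget, head?_mySplit]
        simp
      · have h1 : ((mySplit rest).modifyHead (c :: ·)).length = (mySplit rest).length := by
          simp
        have h2 : ((mySplit rest).modifyHead (c :: ·))[1]? = (mySplit rest)[1]? := by
          cases mySplit rest <;> simp
        have hstep : pvScanA (c :: rest) false 0 = pvScanA rest false 0 := by
          simp [pvScanA, h]
        rw [hstep, ih]
        simp only [mySplit, if_neg h, h1, h2]

-- ===== VERDICT (by name: the statement is the Claim_ definition above) =====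
theorem calc_board_width_spec : Claim_equal_calc_board_width := by
  intro s _
  show calc_board_width s = calc_board_width_alt s
  rw [calc_board_width, calc_board_width_alt]
  simp only [splitOn_eq_mySplit]
  exact scan_eq s.toList
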